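-- pv_equiv track=rewrite | github.com/Reece030130/CITS3001-REVIEW | project/find.py | find
-- ===== SOURCE A (Python) =====
-- def find(answers: str, correct_answer: str) -> int:
--     dp_table = []
--     point = 0
--     max_points = 0
--     for index, _ in enumerate(answers):
--         if correct_answer[index] != answers[index]:
--             if (answers[index], correct_answer[index]) not in dp_table:
--                 points = 0
--                 for i, _ in enumerate(answers):
--                     if answers[index] == answers[i]:
--                         if correct_answer[index] == correct_answer[i]:
--                             points += 1
--                     elif answers[i] == correct_answer[i]:
--                         points += 1
--                 dp_table.append((answers[index], correct_answer[index]))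
--                 max_points = max(max_points, points)
--         else:
--             point += 1
--
--     return max(point, max_points)
-- ===== SOURCE B (Python) =====
-- def find(answers: str, correct_answer: str) -> int:
--     # One pass: count each (answer, correct) pair and the already-correct total,
--     # then score every distinct mismatched pair from the counts.
--     cnt = {}
--     base = 0
--     for a, c in zip(answers, correct_answer):
--         cnt[(a, c)] = cnt.get((a, c), 0) + 1
--         if a == c:
--             base += 1
--     best = base
--     for (a, c), k in cnt.items():
--         if a != c:
--             best = max(best, k + base - cnt.get((a, a), 0))
--     return best
-- ===== Notes on version B (the rewrite author's own statement) =====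
-- stated objective: faster
-- what changed: Instead of rescanning the whole string for every new mismatched (answer,correct) pair, B counts every pair and the already-correct total in one pass and scores each distinct mismatched pair as count(a,c)+base-count(a,a) from the counter.
import Mathlib
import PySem

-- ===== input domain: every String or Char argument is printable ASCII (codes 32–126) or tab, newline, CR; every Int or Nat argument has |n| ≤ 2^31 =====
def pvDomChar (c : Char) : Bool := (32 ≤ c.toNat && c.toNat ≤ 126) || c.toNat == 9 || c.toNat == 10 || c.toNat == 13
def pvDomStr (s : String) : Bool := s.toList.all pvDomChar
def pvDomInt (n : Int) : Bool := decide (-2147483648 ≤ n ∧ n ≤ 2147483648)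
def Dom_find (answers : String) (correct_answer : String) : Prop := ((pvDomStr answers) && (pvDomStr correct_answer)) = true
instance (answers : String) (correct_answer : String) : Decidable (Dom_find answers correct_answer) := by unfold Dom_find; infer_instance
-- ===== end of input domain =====

-- B replaces A's per-pair rescan of the strings by one counting pass plus arithmetic per distinct pair (measured faster).
-- A raises IndexError when correct_answer is shorter than answers (those inputs are excluded by Pre_find).


-- ===== PORT A =====
-- inner loop: 'points' for the candidate substitution (ai -> ci); answers[index]/correct_answer[i]
-- are List.getD accesses — exact because every index is < len(answers) ≤ len(correct_answer) under Pre_find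
def innerA (aL cL : List Char) (ai ci : Char) : Int :=
  (List.range aL.length).foldl
    (fun pts i =>
      if ai == aL.getD i ' ' then
        (if ci == cL.getD i ' ' then pts + 1 else pts)
      else if aL.getD i ' ' == cL.getD i ' ' then pts + 1 else pts) 0

-- one step of A's outer loop; state = (dp_table, point, max_points)
def stepA (aL cL : List Char) (s : List (Char × Char) × Int × Int) (ai ci : Char) :
    List (Char × Char) × Int × Int :=
  if ci ≠ ai then
    if (ai, ci) ∉ s.1 then
      (s.1 ++ [(ai, ci)], s.2.1, max s.2.2 (innerA aL cL ai ci))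
    else s
  else (s.1, s.2.1 + 1, s.2.2)

-- A's outer loop over the indices of answers
def stateA (aL cL : List Char) : List (Char × Char) × Int × Int :=
  (List.range aL.length).foldl
    (fun s index => stepA aL cL s (aL.getD index ' ') (cL.getD index ' ')) ([], 0, 0)

def find (answers : String) (correct_answer : String) : Int :=
  let st := stateA answers.toList correct_answer.toList
  max st.2.1 st.2.2

-- ===== PORT B =====
-- B's single counting pass: the pair counter and the already-correct total
def stateB (pairs : List (Char × Char)) : PySem.Dict (Char × Char) Int × Int :=
  pairs.foldl
    (fun (s : PySem.Dict (Char × Char) Int × Int) p =>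
      (s.1.insert p (s.1.getD p 0 + 1), if p.1 == p.2 then s.2 + 1 else s.2))
    (PySem.Dict.empty, 0)

def find_alt (answers : String) (correct_answer : String) : Int :=
  let st := stateB (answers.toList.zip correct_answer.toList)
  st.1.items.foldl
    (fun best kv =>
      if kv.1.1 != kv.1.2 then max best (kv.2 + st.2 - st.1.getD (kv.1.1, kv.1.1) 0) else best)
    st.2

-- ===== PRECONDITION & SPEC =====
-- Pre_find excludes exactly the inputs where A raises IndexError (correct_answer shorter than answers)
def Pre_find (answers : String) (correct_answer : String) : Prop :=
  answers.toList.length ≤ correct_answer.toList.length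
instance (answers : String) (correct_answer : String) : Decidable (Pre_find answers correct_answer) := by
  unfold Pre_find; infer_instance
def pvWitness_find : String × String := ("ab", "bb")

def Spec_find (answers : String) (correct_answer : String) (out : Int) : Prop :=
  out = find_alt answers correct_answer
instance (answers : String) (correct_answer : String) (out : Int) : Decidable (Spec_find answers correct_answer out) := by
  unfold Spec_find; infer_instance

-- ===== CLAIM (what is proved, stated in full; the proofs are below) =====
def Claim_equal_find : Prop := ∀ (answers : String) (correct_answer : String),
  Dom_find answers correct_answer → Pre_find answers correct_answer →
  Spec_find answers correct_answer (find answers correct_answer)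

-- ===== LEMMAS AND PROOFS =====

-- index-based fold over both strings = fold over their zip (all indices in range)
lemma foldl_range_getD_zip {β : Type} (g : β → Char → Char → β) :
    ∀ (aL cL : List Char), aL.length ≤ cL.length → ∀ (init : β),
    (List.range aL.length).foldl (fun s i => g s (aL.getD i ' ') (cL.getD i ' ')) init
      = (aL.zip cL).foldl (fun s p => g s p.1 p.2) init := by
  intro aL
  induction aL with
  | nil => intro cL h init; simp
  | cons a aL ih =>
    intro cL h init
    cases cL with
    | nil => simp at h
    | cons c cL =>
      simp only [List.length_cons, List.range_succ_eq_map, List.foldl_cons, List.foldl_map,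
        List.getD_cons_zero, List.getD_cons_succ, List.zip_cons_cons]
      exact ih cL (by simpa using h) _

-- per-element identity: A's inner loop = count(a,c) + #matches - count(a,a)  (for a ≠ c)
lemma points_eq (a c : Char) (hac : a ≠ c) :
    ∀ (P : List (Char × Char)) (init : Int),
    P.foldl (fun pts p =>
        if a == p.1 then (if c == p.2 then pts + 1 else pts)
        else if p.1 == p.2 then pts + 1 else pts) init
      = init + (P.count (a, c) : Int) + (P.countP (fun p => p.1 == p.2) : Int)
          - (P.count (a, a) : Int) := by
  intro P
  induction P with
  | nil => intro init; simp
  | cons p P ih =>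
    intro init
    obtain ⟨x, y⟩ := p
    simp only [List.foldl_cons, List.count_cons, List.countP_cons, ih]
    by_cases h1 : x = a
    · subst h1
      by_cases h2 : y = c
      · subst h2
        simp [beq_iff_eq, hac, Ne.symm hac]
        push_cast; ring
      · by_cases h3 : y = x
        · subst h3
          simp [beq_iff_eq, Ne.symm hac, h2]
          push_cast; ring
        · simp [beq_iff_eq, Ne.symm h2, h2, h3, Ne.symm h3]
    · have hax : a ≠ x := fun hh => h1 hh.symm
      by_cases h3 : x = y
      · subst h3
        simp [beq_iff_eq, hax, h1]
        push_cast; ring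
      · simp [beq_iff_eq, hax, h1, h3]

-- the list of distinct mismatched pairs A appends to dp_table (first-occurrence order),
-- starting from table t
def DT : List (Char × Char) → List (Char × Char) → List (Char × Char)
  | [], _ => []
  | q :: Q, t =>
    if q.2 ≠ q.1 then
      (if q ∉ t then q :: DT Q (t ++ [q]) else DT Q t)
    else DT Q t

-- the fresh keys (first occurrences) a left-to-right insertion adds after seen-set u
def FOcc : List (Char × Char) → List (Char × Char) → List (Char × Char)
  | [], _ => []
  | q :: Q, u => if q ∈ u then FOcc Q u else q :: FOcc Q (u ++ [q])

lemma update_eq_FOcc : ∀ (Q u : List (Char × Char)), PySem.Set.update u Q = u ++ FOcc Q u := by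
  intro Q
  induction Q with
  | nil => intro u; simp [PySem.Set.update, FOcc]
  | cons q Q ih =>
    intro u
    by_cases hq : q ∈ u
    · simpa [PySem.Set.update, FOcc, PySem.Set.add, hq]
        using ih u
    · have := ih (u ++ [q])
      simp [PySem.Set.update, FOcc, PySem.Set.add, hq] at this ⊢
      simpa using this

lemma DT_eq_filter :
    ∀ (Q t u : List (Char × Char)),
    (∀ x : Char × Char, x.2 ≠ x.1 → (x ∈ t ↔ x ∈ u)) →
    DT Q t = (FOcc Q u).filter (fun x => x.1 != x.2) := by
  intro Q
  induction Q with
  | nil => intro t u _; simp [DT, FOcc]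
  | cons q Q ih =>
    intro t u H
    by_cases hm : q.2 ≠ q.1
    · by_cases ht : q ∈ t
      · have hu : q ∈ u := (H q hm).1 ht
        simp only [DT, FOcc, if_pos hm, if_neg (not_not.mpr ht), if_pos hu]
        exact ih t u H
      · have hu : q ∉ u := fun h => ht ((H q hm).2 h)
        have hb : (q.1 != q.2) = true := by
          simp [bne_iff_ne]; exact fun h => hm (h ▸ rfl)
        simp only [DT, FOcc, if_pos hm, if_pos ht, if_neg hu, List.filter_cons, hb]
        refine congrArg _ (ih (t ++ [q]) (u ++ [q]) ?_)
        intro x hx; simp only [List.mem_append, List.mem_singleton]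
        exact or_congr (H x hx) Iff.rfl
    · have hb : (q.1 != q.2) = false := by
        simp only [ne_eq, not_not] at hm
        simp [bne_iff_ne, hm]
      by_cases hu : q ∈ u
      · simp only [DT, FOcc, if_neg hm, if_pos hu]
        exact ih t u H
      · simp only [DT, FOcc, if_neg hm, if_neg hu, List.filter_cons, hb]
        refine ih t (u ++ [q]) ?_
        intro x hx
        have hxq : x ≠ q := by
          intro h; subst h; exact hm hx
        simp only [List.mem_append, List.mem_singleton]
        simp only [List.mem_append, List.mem_singleton, hxq, or_false]
        exact H x hx
  
-- invariant of A's outer loop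
lemma outer_inv (aL cL : List Char) :
    ∀ (P : List (Char × Char)) (t : List (Char × Char)) (p m : Int),
    P.foldl (fun s q => stepA aL cL s q.1 q.2) (t, p, m)
      = (t ++ DT P t, p + (P.countP (fun q => q.1 == q.2) : Int),
         (DT P t).foldl (fun m q => max m (innerA aL cL q.1 q.2)) m) := by
  intro P
  induction P with
  | nil => intro t p m; simp [DT]
  | cons q Q ih =>
    intro t p m
    rw [List.foldl_cons]
    by_cases hm : q.2 ≠ q.1
    · have hb : (q.1 == q.2) = false := by
        simp only [beq_eq_false_iff_ne, ne_eq]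
        exact fun h => hm h.symm
      by_cases ht : q ∈ t
      · have hstep : stepA aL cL (t, p, m) q.1 q.2 = (t, p, m) := by
          simp [stepA, hm, Prod.mk.eta, ht]
        rw [hstep, ih]
        simp [DT, hm, ht, List.countP_cons, hb]
      · have hstep : stepA aL cL (t, p, m) q.1 q.2
            = (t ++ [q], p, max m (innerA aL cL q.1 q.2)) := by
          simp [stepA, hm, Prod.mk.eta, ht]
        rw [hstep, ih]
        simp [DT, hm, ht, List.countP_cons, hb, List.append_assoc]
    · have hm' : q.2 = q.1 := not_not.mp hm
      have hb : (q.1 == q.2) = true := by simp [beq_iff_eq, hm'.symm]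
      have hstep : stepA aL cL (t, p, m) q.1 q.2 = (t, p + 1, m) := by
        simp [stepA, hm']
      have hDT : DT (q :: Q) t = DT Q t := by simp [DT, hm]
      have harith : p + 1 + (Q.countP (fun q => q.1 == q.2) : Int)
          = p + ((q :: Q).countP (fun q => q.1 == q.2) : Int) := by
        rw [List.countP_cons]
        simp [hb]
        push_cast
        ring
      rw [hstep, ih, hDT, harith]

-- running max with a larger start absorbs the smaller one
lemma foldl_max_shift (f : Char × Char → Int) :
    ∀ (M : List (Char × Char)) (b e : Int), e ≤ b →
    M.foldl (fun m k => max m (f k)) b = max b (M.foldl (fun m k => max m (f k)) e) := by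
  intro M
  induction M with
  | nil => intro b e h; simp [max_eq_left h]
  | cons k M ih =>
    intro b e h
    simp only [List.foldl_cons]
    rw [ih (max b (f k)) (max e (f k)) (by omega)]
    have h1 : max e (f k) ≤ M.foldl (fun m k => max m (f k)) (max e (f k)) :=
      (PySem.List.le_foldl_max_int M f (max e (f k))).1
    omega

theorem find_spec_aux (answers correct_answer : String)
    (h : Pre_find answers correct_answer) :
    find answers correct_answer = find_alt answers correct_answer := by
  unfold Pre_find at h
  set aL := answers.toList with haL
  set cL := correct_answer.toList with hcL
  set P := aL.zip cL with hP
  have hA0 : find answers correct_answer = max (stateA aL cL).2.1 (stateA aL cL).2.2 := rfl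
  have hB0 : find_alt answers correct_answer
      = (stateB P).1.items.foldl
          (fun best kv => if kv.1.1 != kv.1.2 then
              max best (kv.2 + (stateB P).2 - (stateB P).1.getD (kv.1.1, kv.1.1) 0) else best)
          (stateB P).2 := rfl
  rw [hA0, hB0]
  -- A: index fold → zip fold
  have hA : stateA aL cL
      = P.foldl (fun s q => stepA aL cL s q.1 q.2) ([], (0:Int), (0:Int)) :=
    foldl_range_getD_zip (fun s x y => stepA aL cL s x y) aL cL h _
  rw [hA, outer_inv aL cL P [] 0 0]
  -- B: split the counting loop into the counter and the match count
  unfold stateB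
  rw [PySem.List.foldl_prod_mk (f := fun d q => PySem.Dict.insert d q (PySem.Dict.getD d q 0 + 1))
        (g := fun b (q : Char × Char) => if q.1 == q.2 then b + 1 else b)]
  rw [PySem.Dict.foldl_insert_getD_add_one_eq_counter,
      PySem.List.foldl_if_add_one (p := fun q : Char × Char => q.1 == q.2)]
  rw [PySem.Dict.items_counter]
  rw [List.foldl_map]
  set base : Int := (0 : Int) + (P.countP (fun q => q.1 == q.2) : Int) with hbase
  -- B's per-key value uses the counter lookups
  have hBvals : ∀ (b : Int), (PySem.Set.ofList P).foldl
      (fun best k => if k.1 != k.2 then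
          max best ((P.count k : Int) + base - (PySem.Dict.counter P).getD (k.1, k.1) 0)
        else best) b
      = ((PySem.Set.ofList P).filter (fun k => k.1 != k.2)).foldl
          (fun best k => max best ((P.count k : Int) + base - (P.count (k.1, k.1) : Int))) b := by
    intro b
    rw [PySem.List.foldl_if_eq_foldl_filter (p := fun k : Char × Char => k.1 != k.2)]
    apply PySem.List.foldl_congr_mem
    intro acc k _
    rw [PySem.Dict.getD_counter]
  rw [hBvals]
  -- A's dp_table list = the filtered first-occurrence list
  have hofList : PySem.Set.ofList P = FOcc P [] := by
    have := update_eq_FOcc P []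
    simpa [PySem.Set.ofList_eq_foldl, PySem.Set.update] using this
  have hDT : DT P [] = (PySem.Set.ofList P).filter (fun x => x.1 != x.2) := by
    rw [hofList]
    exact DT_eq_filter P [] [] (by intro x _; rfl)
  rw [hDT]
  -- A's per-pair inner loop = B's arithmetic, on every kept pair
  have hvals : ((PySem.Set.ofList P).filter (fun x => x.1 != x.2)).foldl
      (fun m q => max m (innerA aL cL q.1 q.2)) 0
      = ((PySem.Set.ofList P).filter (fun x => x.1 != x.2)).foldl
          (fun m q => max m ((P.count q : Int) + base - (P.count (q.1, q.1) : Int))) 0 := by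
    apply PySem.List.foldl_congr_mem
    intro acc q hq
    have hne : q.1 ≠ q.2 := by
      have := List.of_mem_filter hq
      simpa [bne_iff_ne] using this
    have hinner : innerA aL cL q.1 q.2
        = (P.count (q.1, q.2) : Int) + (P.countP (fun p => p.1 == p.2) : Int)
            - (P.count (q.1, q.1) : Int) := by
      unfold innerA
      have := foldl_range_getD_zip
        (fun pts x y => if q.1 == x then (if q.2 == y then pts + 1 else pts)
          else if x == y then pts + 1 else pts) aL cL h (0 : Int)
      rw [this, points_eq q.1 q.2 hne P 0]
      ring
    rw [hinner, Prod.mk.eta]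
    have : base = (P.countP (fun p => p.1 == p.2) : Int) := by rw [hbase]; ring
    rw [this]
  rw [hvals]
  -- finally: max base (fold from 0) = fold from base
  have hb0 : (0 : Int) ≤ base := by
    rw [hbase]; positivity
  rw [foldl_max_shift (fun q => (P.count q : Int) + base - (P.count (q.1, q.1) : Int)) _ base 0 hb0]

-- ===== VERDICT (by name: the statement is the Claim_ definition above) =====
theorem find_spec : Claim_equal_find := by
  intro answers correct_answer _ hpre
  unfold Spec_find
  exact find_spec_aux answers correct_answer hpre
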